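-- pv_equiv track=rewrite | github.com/popcornGit/track-car | track_mq_nochange.py | new_car_3
-- ===== SOURCE A (Python) =====
-- def new_car_3(car_tmp):
--     for car_lane in range(len(car_tmp)):
--         for car_idx in range(len(car_tmp[car_lane])):
--             if not car_tmp[car_lane][car_idx]:
--                 car_tmp[car_lane][car_idx] = 3
--             else:
--                 break
--
--     return car_tmp
-- ===== SOURCE B (Python) =====
-- def new_car_3(car_tmp):
--     # Stage 1: for each lane build a prefix-OR table of "a truthy cell has
--     # occurred at or before this position"; Stage 2: rewrite every cell whose
--     # flag is False to 3 (no early exit / break needed).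
--     for lane in car_tmp:
--         flags = []
--         seen = False
--         for v in lane:
--             seen = seen or bool(v)
--             flags.append(seen)
--         for i, s in enumerate(flags):
--             if not s:
--                 lane[i] = 3
--     return car_tmp
-- ===== Notes on version B (the rewrite author's own statement) =====
-- stated objective: alternative
-- what changed: A mutates cells one by one and breaks at the first truthy cell; B never breaks: it first builds a prefix-OR flags table per lane (truthy seen so far) in a full pass, then in a second pass rewrites exactly the cells whose flag is False to 3.
import Mathlib
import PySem

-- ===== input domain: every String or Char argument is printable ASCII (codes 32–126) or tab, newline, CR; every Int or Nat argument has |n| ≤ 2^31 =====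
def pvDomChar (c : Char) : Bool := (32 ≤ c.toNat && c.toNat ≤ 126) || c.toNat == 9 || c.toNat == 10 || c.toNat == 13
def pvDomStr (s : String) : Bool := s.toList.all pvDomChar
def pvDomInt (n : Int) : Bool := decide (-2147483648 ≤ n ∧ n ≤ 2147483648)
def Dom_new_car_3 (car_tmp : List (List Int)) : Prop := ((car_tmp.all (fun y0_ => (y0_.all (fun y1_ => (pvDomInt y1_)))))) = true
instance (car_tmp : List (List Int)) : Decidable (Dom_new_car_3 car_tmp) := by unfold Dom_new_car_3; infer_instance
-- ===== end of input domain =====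

-- Return-value equivalence; both Pythons also mutate car_tmp's lanes in place identically.
-- B replaces A's cell-by-cell loop-with-break by two staged full passes per lane:
-- build a prefix-OR flags table, then rewrite the cells whose flag is false to 3.


-- ===== PORT A =====
-- inner loop over car_idx with break: write 3 while the cell is falsy (0), stop at the first truthy cell
def fillLaneA : List Int → List Int
  | [] => []
  | x :: xs => if x == 0 then 3 :: fillLaneA xs else x :: xs

def new_car_3 (car_tmp : List (List Int)) : List (List Int) :=
  car_tmp.map fillLaneA

-- ===== PORT B =====
-- Stage 1 of Source B: running prefix-OR flags 'seen = seen or bool(v)' appended per cell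
def prefixFlags : List Int → Bool → List Bool
  | [], _ => []
  | v :: vs, seen =>
      let seen' := seen || (v != 0)
      seen' :: prefixFlags vs seen'

-- Stage 2 of Source B: cell i becomes 3 when its flag is false, else stays
def fillLaneB (lane : List Int) : List Int :=
  (lane.zip (prefixFlags lane false)).map (fun p => if p.2 then p.1 else 3)

def new_car_3_alt (car_tmp : List (List Int)) : List (List Int) :=
  car_tmp.map fillLaneB

-- ===== PRECONDITION & SPEC =====
def Spec_new_car_3 (car_tmp : List (List Int)) (out : List (List Int)) : Prop := out = new_car_3_alt car_tmp
instance (car_tmp : List (List Int)) (out : List (List Int)) : Decidable (Spec_new_car_3 car_tmp out) := by unfold Spec_new_car_3; infer_instance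

-- ===== CLAIM (what is proved, stated in full; the proofs are below) =====
def Claim_equal_new_car_3 : Prop := ∀ (car_tmp : List (List Int)), Dom_new_car_3 car_tmp → Spec_new_car_3 car_tmp (new_car_3 car_tmp)

-- ===== LEMMAS AND PROOFS =====
-- once the flag is true it stays true, and then stage 2 rewrites nothing
theorem zipmap_true (xs : List Int) :
    (xs.zip (prefixFlags xs true)).map (fun p => if p.2 then p.1 else 3) = xs := by
  induction xs with
  | nil => rfl
  | cons x xs ih => simp [prefixFlags, ih]

theorem fillLane_eq (lane : List Int) : fillLaneA lane = fillLaneB lane := by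
  induction lane with
  | nil => rfl
  | cons x xs ih =>
    by_cases hx : x = 0
    · subst hx
      simp [fillLaneA, fillLaneB, prefixFlags] at ih ⊢
      exact ih
    · have hb : (x != 0) = true := by simpa using hx
      simp [fillLaneA, fillLaneB, prefixFlags, hb, hx, zipmap_true xs]

-- ===== VERDICT (by name: the statement is the Claim_ definition above) =====
theorem new_car_3_spec : Claim_equal_new_car_3 := by
  intro car_tmp _
  unfold Spec_new_car_3 new_car_3 new_car_3_alt
  exact List.map_congr_left (fun lane _ => fillLane_eq lane)
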